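-- pv_equiv track=rewrite | github.com/UtulsaEAP/lab-9-tifiani | problem 4/intToBin.py | int_to_reverse_binary
-- ===== SOURCE A (Python) =====
-- def int_to_reverse_binary(num1):
--     if num1 == 0:
--         return ("0")
--
--     binary_val = ''
-- #write your while loop here
--
--     while num1 > 0:
--         binary_val += str(num1 % 2)
--         #rem = num1 % 2
--         num1 //= 2
--         #write your code
--
--     return binary_val
-- ===== SOURCE B (Python) =====
-- def int_to_reverse_binary(num1):
--     if num1 == 0:
--         return "0"
--     if num1 < 0:
--         return ""
--     return ''.join('1' if (num1 >> i) & 1 else '0' for i in range(num1.bit_length()))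
-- ===== Notes on version B (the rewrite author's own statement) =====
-- stated objective: alternative
-- what changed: B drops A's destructive divide-by-2 while loop with string accumulation and instead indexes the bits directly, joining the low bit of each right shift of num1 over the range of num1.bit_length(); explicit guards reproduce A's outputs for zero and for negatives, where A's loop never runs.
import Mathlib
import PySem

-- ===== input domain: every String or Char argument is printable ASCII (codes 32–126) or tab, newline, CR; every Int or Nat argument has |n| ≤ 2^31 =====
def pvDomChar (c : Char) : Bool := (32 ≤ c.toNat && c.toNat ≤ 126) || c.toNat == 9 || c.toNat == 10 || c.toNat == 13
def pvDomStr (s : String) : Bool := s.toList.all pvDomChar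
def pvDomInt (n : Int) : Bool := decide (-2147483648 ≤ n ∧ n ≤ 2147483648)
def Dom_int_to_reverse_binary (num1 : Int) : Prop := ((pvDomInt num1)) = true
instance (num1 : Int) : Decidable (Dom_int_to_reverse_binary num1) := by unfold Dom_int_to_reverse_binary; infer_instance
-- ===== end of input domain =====

-- B replaces A's destructive divide-by-2 accumulation loop by direct bit indexing:
-- join the low bit of each right shift of num1, over range(num1.bit_length()) (alternative decomposition).

-- ===== PORT A =====
-- the while loop of A: appends str(num1 % 2), then num1 //= 2
def intToRevBinLoop (num1 : Int) (binary_val : String) : String :=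
  if _h : num1 > 0 then
    intToRevBinLoop (PySem.Int.floordiv num1 2) (binary_val ++ PySem.Int.toStr (PySem.Int.mod num1 2))
  else binary_val
termination_by num1.toNat
decreasing_by
  rw [PySem.Int.floordiv_eq_ediv_of_pos (by omega : (0:Int) < 2)]
  omega

def int_to_reverse_binary (num1 : Int) : String :=
  if num1 = 0 then "0"
  else intToRevBinLoop num1 ""

-- ===== PORT B =====
-- On positive n: (n >> i) & 1 is exactly Nat.testBit, and n.bit_length() = Nat.log2 n + 1.
def int_to_reverse_binary_alt (num1 : Int) : String :=
  if num1 = 0 then "0"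
  else if num1 < 0 then ""
  else String.ofList
    ((List.range (num1.toNat.log2 + 1)).map (fun i => if num1.toNat.testBit i then '1' else '0'))

-- ===== PRECONDITION & SPEC =====
def Spec_int_to_reverse_binary (num1 : Int) (out : String) : Prop := out = int_to_reverse_binary_alt num1
instance (num1 : Int) (out : String) : Decidable (Spec_int_to_reverse_binary num1 out) := by unfold Spec_int_to_reverse_binary; infer_instance

-- ===== CLAIM (what is proved, stated in full; the proofs are below) =====
def Claim_equal_int_to_reverse_binary : Prop := ∀ (num1 : Int), Dom_int_to_reverse_binary num1 → Spec_int_to_reverse_binary num1 (int_to_reverse_binary num1)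

-- ===== LEMMAS AND PROOFS =====

def bitChars (n : Nat) : List Char :=
  (List.range (n.log2 + 1)).map (fun i => if n.testBit i then '1' else '0')

lemma bitChars_step (n : Nat) (h : 2 ≤ n) :
    bitChars n = (if n.testBit 0 then '1' else '0') :: bitChars (n / 2) := by
  unfold bitChars
  have hlog : n.log2 = (n / 2).log2 + 1 := by
    rw [Nat.log2_def]; simp [h]
  rw [hlog, List.range_succ_eq_map]
  simp [List.map_map, Function.comp, Nat.testBit_add_one]

lemma mod_str (n : Int) (h : 0 < n) :
    PySem.Int.toStr (PySem.Int.mod n 2)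
      = String.ofList [if n.toNat.testBit 0 then '1' else '0'] := by
  have hm : PySem.Int.mod n 2 = n % 2 :=
    PySem.Int.mod_eq_emod_of_pos (by omega)
  have ht : n.toNat.testBit 0 = decide (n.toNat % 2 = 1) := by
    simp [Nat.testBit_zero]
  have hnat : (n % 2) = ((n.toNat % 2 : Nat) : Int) := by omega
  rcases Nat.mod_two_eq_zero_or_one n.toNat with h2 | h2 <;>
    simp [hnat, h2, ht] <;> decide

lemma loop_eq (k : Nat) : ∀ (n : Int) (acc : String), n.toNat = k → 0 < n →
    intToRevBinLoop n acc = acc ++ String.ofList (bitChars n.toNat) := by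
  induction k using Nat.strong_induction_on with
  | _ k ih =>
    intro n acc hk hn
    rw [intToRevBinLoop]
    simp only [hn, dite_true]
    have hdiv : PySem.Int.floordiv n 2 = n / 2 :=
      PySem.Int.floordiv_eq_ediv_of_pos (by omega)
    by_cases h1 : n = 1
    · subst h1
      rw [intToRevBinLoop]
      have : PySem.Int.floordiv 1 2 = 0 := by rw [hdiv]; decide
      rw [this]
      simp only [show ¬ ((0:Int) > 0) by decide, dite_false]
      rw [mod_str 1 (by decide)]
      have : bitChars (1:Int).toNat = ['1'] := by decide
      rw [this]
      rfl
    · have hn2 : 2 ≤ n := by omega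
      have hpos : 0 < PySem.Int.floordiv n 2 := by rw [hdiv]; omega
      have hlt : (PySem.Int.floordiv n 2).toNat < k := by rw [hdiv]; omega
      rw [ih _ hlt _ _ rfl hpos]
      have htn : (PySem.Int.floordiv n 2).toNat = n.toNat / 2 := by rw [hdiv]; omega
      rw [htn, bitChars_step n.toNat (by omega), mod_str n hn,
        String.append_assoc, ← String.ofList_append, List.singleton_append]

-- ===== VERDICT (by name: the statement is the Claim_ definition above) =====
theorem int_to_reverse_binary_spec : Claim_equal_int_to_reverse_binary := by
  intro n _
  unfold Spec_int_to_reverse_binary int_to_reverse_binary int_to_reverse_binary_alt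
  by_cases h0 : n = 0
  · simp [h0]
  · by_cases hneg : n < 0
    · rw [intToRevBinLoop]
      simp [h0, hneg, show ¬ n > 0 by omega]
    · have hpos : 0 < n := by omega
      rw [loop_eq n.toNat n "" rfl hpos]
      simp [h0, show ¬ n < 0 by omega, bitChars]
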